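-- pv_equiv track=rewrite | github.com/ingkoon/Algorithm | 프로그래머스/Weekly_challange/Week1.py | solution
-- ===== SOURCE A (Python) =====
-- def solution(price, money, count):
--     # 임시 변수 할당
--     tmp = 0
--     for i in range(1,count+1):
--         tmp += price * i
--     answer = tmp - money
--     if answer > 0:
--         return answer
--     return 0
-- ===== SOURCE B (Python) =====
-- def solution(price, money, count):
--     total = price * count * (count + 1) // 2 if count > 0 else 0
--     return max(total - money, 0)
-- ===== Notes on version B (the rewrite author's own statement) =====
-- stated objective: faster
-- what changed: replaced the O(count) summation loop by the closed-form arithmetic-series formula price*count*(count+1)//2 and the final branch by max(..., 0)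
import Mathlib
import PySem

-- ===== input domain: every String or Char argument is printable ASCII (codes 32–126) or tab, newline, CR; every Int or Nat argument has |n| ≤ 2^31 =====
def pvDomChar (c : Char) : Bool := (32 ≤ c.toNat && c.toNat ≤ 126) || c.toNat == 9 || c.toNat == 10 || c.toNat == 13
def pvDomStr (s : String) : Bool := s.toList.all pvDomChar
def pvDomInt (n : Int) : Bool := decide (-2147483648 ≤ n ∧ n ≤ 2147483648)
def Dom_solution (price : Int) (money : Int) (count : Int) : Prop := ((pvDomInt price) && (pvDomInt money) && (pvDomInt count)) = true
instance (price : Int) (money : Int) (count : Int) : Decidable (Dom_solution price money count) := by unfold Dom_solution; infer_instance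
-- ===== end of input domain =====

-- B replaces A's O(count) summation loop by the closed-form arithmetic series price*count*(count+1)//2 (O(1)).


-- ===== PORT A =====
def solution (price : Int) (money : Int) (count : Int) : Int :=
  let tmp := (PySem.List.pyRange 1 (count + 1) 1).foldl (fun tmp i => tmp + price * i) 0
  let answer := tmp - money
  if answer > 0 then answer else 0

-- ===== PORT B =====
def solution_alt (price : Int) (money : Int) (count : Int) : Int :=
  let total := if count > 0 then PySem.Int.floordiv (price * count * (count + 1)) 2 else 0
  max (total - money) 0

-- ===== PRECONDITION & SPEC =====
def Spec_solution (price : Int) (money : Int) (count : Int) (out : Int) : Prop := out = solution_alt price money count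
instance (price : Int) (money : Int) (count : Int) (out : Int) : Decidable (Spec_solution price money count out) := by unfold Spec_solution; infer_instance

-- ===== CLAIM (what is proved, stated in full; the proofs are below) =====
def Claim_equal_solution : Prop := ∀ (price : Int) (money : Int) (count : Int), Dom_solution price money count → Spec_solution price money count (solution price money count)

-- ===== LEMMAS AND PROOFS =====

-- twice the loop's sum is price*n*(n+1)
theorem pv_sum_twice (price : Int) (n : Nat) :
    2 * (PySem.List.pyRange 1 ((n : Int) + 1) 1).foldl (fun t i => t + price * i) 0
      = price * n * (n + 1) := by
  induction n with
  | zero =>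
      rw [show ((0:Nat):Int) + 1 = 1 by norm_num, PySem.List.pyRange_one_eq_nil le_rfl]
      simp
  | succ m ih =>
      have h : PySem.List.pyRange 1 ((m : Int) + 1 + 1) 1
          = PySem.List.pyRange 1 ((m : Int) + 1) 1 ++ [(m : Int) + 1] :=
        PySem.List.pyRange_one_succ_right (by omega)
      push_cast
      rw [h, List.foldl_append]
      simp only [List.foldl_cons, List.foldl_nil]
      push_cast
      push_cast at ih
      linear_combination ih

theorem pv_loop_closed (price : Int) (count : Int) (hc : 0 < count) :
    (PySem.List.pyRange 1 (count + 1) 1).foldl (fun t i => t + price * i) 0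
      = PySem.Int.floordiv (price * count * (count + 1)) 2 := by
  obtain ⟨n, hn⟩ : ∃ n : Nat, count = (n : Int) := ⟨count.toNat, (Int.toNat_of_nonneg hc.le).symm⟩
  subst hn
  have h2 := pv_sum_twice price n
  rw [PySem.Int.floordiv_eq_ediv_of_pos (by omega)]
  omega

-- ===== VERDICT (by name: the statement is the Claim_ definition above) =====
theorem solution_spec : Claim_equal_solution := by
  intro price money count _
  unfold Spec_solution solution solution_alt
  have hmax : ∀ x : Int, (if x > 0 then x else 0) = max x 0 := by
    intro x; rw [max_def]; split_ifs <;> omega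
  by_cases hc : 0 < count
  · simp only [hc, if_pos]
    rw [pv_loop_closed price count hc, hmax]
  · rw [PySem.List.pyRange_one_eq_nil (by omega), if_neg hc]
    simp only [List.foldl_nil]
    rw [hmax]
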